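-- pv_equiv track=rewrite | github.com/Marrina6735/Various-disciplinary-programs | pythonProject/cnfnmcz.py | get_valid_combinations
-- ===== SOURCE A (Python) =====
-- import itertools
--
-- def get_valid_combinations(edges, num_candidates):
--     all_combinations = []
--
--     # Генерация всех возможных сочетаний ребер размера num_candidates
--     for combination in itertools.combinations(edges.items(), num_candidates):
--         # Извлекаем кандидатов и должности из текущего сочетания
--         candidates_in_comb = [edge[1][0] for edge in combination]
--         positions_in_comb = [edge[1][1] for edge in combination]
--
--         # Проверяем уникальность кандидатов и должностей
--         if (len(set(candidates_in_comb)) == num_candidates) and (len(set(positions_in_comb)) == num_candidates):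
--             all_combinations.append(combination)
--
--     return all_combinations
-- ===== SOURCE B (Python) =====
-- def get_valid_combinations(edges, num_candidates):
--     # Backtracking over the edge list in index order, pruning as soon as a
--     # candidate or position repeats (and when too few edges remain).
--     if num_candidates < 0:
--         raise ValueError("num_candidates must be non-negative")
--     items = list(edges.items())
--     n = len(items)
--     out = []
--     chosen = []
--     used_cand = set()
--     used_pos = set()
--
--     def dfs(i, k):
--         if k == 0:
--             out.append(tuple(chosen))
--             return
--         if n - i < k:
--             return
--         key, (cand, pos) = items[i]
--         if cand not in used_cand and pos not in used_pos:
--             chosen.append(items[i])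
--             used_cand.add(cand)
--             used_pos.add(pos)
--             dfs(i + 1, k - 1)
--             chosen.pop()
--             used_cand.discard(cand)
--             used_pos.discard(pos)
--         dfs(i + 1, k)
--
--     dfs(0, num_candidates)
--     return out
-- ===== Notes on version B (the rewrite author's own statement) =====
-- stated objective: alternative
-- what changed: A generates every size-k combination of the edges and filters it by comparing set sizes; B backtracks over the edges in index order, pruning a branch as soon as a candidate or position repeats (or too few edges remain), so only prefixes of valid combinations are ever extended.
import Mathlib
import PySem

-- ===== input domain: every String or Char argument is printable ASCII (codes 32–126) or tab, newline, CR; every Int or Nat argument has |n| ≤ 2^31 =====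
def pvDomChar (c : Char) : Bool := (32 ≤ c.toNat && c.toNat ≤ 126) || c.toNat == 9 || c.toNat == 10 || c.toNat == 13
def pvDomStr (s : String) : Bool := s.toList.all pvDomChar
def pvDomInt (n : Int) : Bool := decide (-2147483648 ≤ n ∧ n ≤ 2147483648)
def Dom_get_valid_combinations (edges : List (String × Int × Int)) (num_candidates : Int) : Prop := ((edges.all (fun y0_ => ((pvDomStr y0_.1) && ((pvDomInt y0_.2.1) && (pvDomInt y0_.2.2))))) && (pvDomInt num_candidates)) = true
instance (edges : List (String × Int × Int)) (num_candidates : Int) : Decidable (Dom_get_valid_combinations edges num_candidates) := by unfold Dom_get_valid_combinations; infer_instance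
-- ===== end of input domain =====

-- B replaces A's "generate every size-k combination, then filter" with backtracking over the
-- edges in index order that prunes a branch as soon as a candidate or position repeats
-- (objective: alternative algorithm, same worst-case cost).

-- ===== PORT A =====
-- itertools.combinations(xs, k), in itertools' order
def pvCombos (k : Nat) (xs : List (String × Int × Int)) : List (List (String × Int × Int)) :=
  match k, xs with
  | 0, _ => [[]]
  | _ + 1, [] => []
  | k + 1, x :: rest => (pvCombos k rest).map (x :: ·) ++ pvCombos (k + 1) rest

def get_valid_combinations (edges : List (String × Int × Int)) (num_candidates : Int) : List (List (String × (Int × Int))) :=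
  (pvCombos num_candidates.toNat edges).filter (fun combination =>
    let candidates_in_comb := combination.map (fun e => e.2.1)
    let positions_in_comb := combination.map (fun e => e.2.2)
    (((PySem.Set.ofList candidates_in_comb).length : Int) == num_candidates)
      && (((PySem.Set.ofList positions_in_comb).length : Int) == num_candidates))

-- ===== PORT B =====
-- backtracking in index order; prune when too few edges remain or when the edge's
-- candidate/position is already used
def pvDfs (xs : List (String × Int × Int)) (k : Nat) (usedC usedP : PySem.Set Int) :
    List (List (String × Int × Int)) :=
  match k, xs with
  | 0, _ => [[]]
  | _ + 1, [] => []
  | k + 1, e :: rest =>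
    if rest.length + 1 < k + 1 then []
    else
      (if ¬ usedC.contains e.2.1 ∧ ¬ usedP.contains e.2.2 then
        (pvDfs rest k (usedC.add e.2.1) (usedP.add e.2.2)).map (e :: ·)
      else []) ++ pvDfs rest (k + 1) usedC usedP

def get_valid_combinations_alt (edges : List (String × Int × Int)) (num_candidates : Int) : List (List (String × (Int × Int))) :=
  pvDfs edges num_candidates.toNat PySem.Set.empty PySem.Set.empty

-- ===== PRECONDITION & SPEC =====
-- Pre_ excludes negative num_candidates (itertools.combinations raises ValueError there, and B
-- raises too) and edge lists with duplicate keys, which are an ambiguous association-list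
-- representation of A's dict argument (dict() collapses such entries).
def Pre_get_valid_combinations (edges : List (String × Int × Int)) (num_candidates : Int) : Prop :=
  0 ≤ num_candidates ∧ (edges.map Prod.fst).Nodup
instance (edges : List (String × Int × Int)) (num_candidates : Int) : Decidable (Pre_get_valid_combinations edges num_candidates) := by unfold Pre_get_valid_combinations; infer_instance

def pvWitness_get_valid_combinations : (List (String × Int × Int)) × Int :=
  ([("a", 1, 1), ("b", 1, 2), ("c", 2, 1)], 2)

def Spec_get_valid_combinations (edges : List (String × Int × Int)) (num_candidates : Int) (out : List (List (String × (Int × Int)))) : Prop := out = get_valid_combinations_alt edges num_candidates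
instance (edges : List (String × Int × Int)) (num_candidates : Int) (out : List (List (String × (Int × Int)))) : Decidable (Spec_get_valid_combinations edges num_candidates out) := by unfold Spec_get_valid_combinations; infer_instance

-- ===== CLAIM (what is proved, stated in full; the proofs are below) =====
def Claim_equal_get_valid_combinations : Prop := ∀ (edges : List (String × Int × Int)) (num_candidates : Int), Dom_get_valid_combinations edges num_candidates → Pre_get_valid_combinations edges num_candidates → Spec_get_valid_combinations edges num_candidates (get_valid_combinations edges num_candidates)

-- ===== LEMMAS AND PROOFS =====

-- the "all distinct and none already used" predicate the backtracking maintains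
def pvOk (usedC usedP : PySem.Set Int) : List (String × Int × Int) → Bool
  | [] => true
  | e :: c =>
    !(usedC.contains e.2.1 || usedP.contains e.2.2)
      && pvOk (usedC.add e.2.1) (usedP.add e.2.2) c

theorem pvNotMem_iff (s : PySem.Set Int) (x : Int) : x ∉ s ↔ s.contains x = false := by
  constructor
  · intro h
    cases hb : s.contains x
    · rfl
    · exact absurd ((PySem.Set.contains_iff s x).1 hb) h
  · intro h hm
    rw [(PySem.Set.contains_iff s x).2 hm] at h
    exact absurd h (by decide)

theorem pvCombos_length_lt {xs : List (String × Int × Int)} {k : Nat}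
    (h : xs.length < k) : pvCombos k xs = [] := by
  induction xs generalizing k with
  | nil => cases k with | zero => omega | succ k => rfl
  | cons x rest ih =>
    cases k with
    | zero => omega
    | succ k =>
      simp only [pvCombos, ih (by simp at h; omega), List.map_nil, List.nil_append]
      exact ih (by simp at h ⊢; omega)

theorem pvCombos_mem_length {xs c : List (String × Int × Int)} {k : Nat}
    (h : c ∈ pvCombos k xs) : c.length = k := by
  induction xs generalizing k c with
  | nil =>
    cases k with
    | zero => simp [pvCombos] at h; simp [h]
    | succ k => simp [pvCombos] at h
  | cons x rest ih =>
    cases k with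
    | zero => simp [pvCombos] at h; simp [h]
    | succ k =>
      simp only [pvCombos, List.mem_append, List.mem_map] at h
      rcases h with ⟨c', hc', rfl⟩ | h
      · simp [ih hc']
      · exact ih h

-- the backtracking equals "generate, then filter with the running predicate"
theorem pvDfs_eq_filter (xs : List (String × Int × Int)) (k : Nat)
    (usedC usedP : PySem.Set Int) :
    pvDfs xs k usedC usedP = (pvCombos k xs).filter (pvOk usedC usedP) := by
  induction xs generalizing k usedC usedP with
  | nil => cases k <;> simp [pvDfs, pvCombos, pvOk]
  | cons e rest ih =>
    cases k with
    | zero => simp [pvDfs, pvCombos, pvOk]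
    | succ k =>
      simp only [pvDfs, pvCombos, List.filter_append, List.filter_map]
      by_cases hlen : rest.length + 1 < k + 1
      · rw [pvCombos_length_lt (by omega), pvCombos_length_lt (by omega)]
        simp [hlen]
      · rw [if_neg hlen, ih, ih]
        congr 1
        by_cases hfree : ¬ usedC.contains e.2.1 ∧ ¬ usedP.contains e.2.2
        · rw [if_pos hfree]
          congr 1
          apply List.filter_congr
          intro c _
          have h1 : usedC.contains e.2.1 = false := by
            cases h : usedC.contains e.2.1 <;> simp_all
          have h2 : usedP.contains e.2.2 = false := by
            cases h : usedP.contains e.2.2 <;> simp_all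
          simp only [Function.comp_apply, pvOk, h1, h2, Bool.or_self, Bool.not_false,
            Bool.true_and]
        · rw [if_neg hfree]
          symm
          rw [List.map_eq_nil_iff, List.filter_eq_nil_iff]
          intro c _
          rw [not_and_or, not_not, not_not] at hfree
          rcases hfree with h | h
          · simp only [Function.comp_apply, pvOk, h, Bool.true_or, Bool.not_true, Bool.false_and]
            decide
          · simp only [Function.comp_apply, pvOk, h, Bool.or_true, Bool.not_true, Bool.false_and]
            decide

-- |set(l)| = |l| iff l has no duplicates
theorem pvSetLen_eq_iff (l : List Int) :
    ((PySem.Set.ofList l).length = l.length) ↔ l.Nodup := by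
  constructor
  · intro h
    have hsub : PySem.Set.ofList l ⊆ l := by
      intro x hx
      exact (PySem.Set.mem_ofList _ _).1 hx
    have hsp := (PySem.Set.nodup_ofList l).subperm hsub
    have hperm := hsp.perm_of_length_le (le_of_eq h.symm)
    exact hperm.nodup (PySem.Set.nodup_ofList l)
  · intro h; rw [PySem.Set.ofList_eq_self_of_nodup _ h]

-- pvOk is exactly "candidates distinct and unused, positions distinct and unused"
theorem pvOk_iff (c : List (String × Int × Int)) (usedC usedP : PySem.Set Int) :
    pvOk usedC usedP c = true ↔
      ((c.map (fun e => e.2.1)).Nodup ∧ (∀ x ∈ c.map (fun e => e.2.1), x ∉ usedC)) ∧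
      ((c.map (fun e => e.2.2)).Nodup ∧ (∀ x ∈ c.map (fun e => e.2.2), x ∉ usedP)) := by
  induction c generalizing usedC usedP with
  | nil => simp [pvOk]
  | cons e t ih =>
    simp only [pvOk, Bool.and_eq_true, Bool.not_eq_true', Bool.or_eq_false_iff, ih,
      List.map_cons, List.nodup_cons, List.mem_map, List.mem_cons, forall_eq_or_imp,
      ← pvNotMem_iff, PySem.Set.mem_add, not_or]
    constructor
    · rintro ⟨⟨hc, hp⟩, ⟨⟨hcn, hcu⟩, hpn, hpu⟩⟩
      refine ⟨⟨⟨?_, hcn⟩, hc, fun x hx => (hcu x hx).1⟩, ⟨?_, hpn⟩, hp, fun x hx => (hpu x hx).1⟩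
      · intro hmem
        rcases hmem with ⟨a, ha, hae⟩
        exact (hcu _ ⟨a, ha, hae⟩).2 rfl
      · intro hmem
        rcases hmem with ⟨a, ha, hae⟩
        exact (hpu _ ⟨a, ha, hae⟩).2 rfl
    · rintro ⟨⟨⟨hce, hcn⟩, hc, hcu⟩, ⟨⟨hpe, hpn⟩, hp, hpu⟩⟩
      refine ⟨⟨hc, hp⟩, ⟨hcn, fun x hx => ⟨hcu x hx, fun hxe => hce (by rwa [hxe] at hx)⟩⟩,
        hpn, fun x hx => ⟨hpu x hx, fun hxe => hpe (by rwa [hxe] at hx)⟩⟩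

theorem get_valid_combinations_spec : Claim_equal_get_valid_combinations := by
  intro edges num_candidates _ hpre
  unfold Spec_get_valid_combinations get_valid_combinations get_valid_combinations_alt
  rw [pvDfs_eq_filter]
  apply List.filter_congr
  intro c hc
  have hk : (num_candidates.toNat : Int) = num_candidates := Int.toNat_of_nonneg hpre.1
  have hlen := pvCombos_mem_length hc
  have key : ∀ f : (String × Int × Int) → Int,
      (((PySem.Set.ofList (c.map f)).length : Int) = num_candidates) ↔ (c.map f).Nodup := by
    intro f
    have hl : (c.map f).length = num_candidates.toNat := by simp [hlen]
    rw [← hk, Int.natCast_inj]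
    constructor
    · intro heq; exact (pvSetLen_eq_iff _).1 (heq.trans hl.symm)
    · intro hnd; exact ((pvSetLen_eq_iff _).2 hnd).trans hl
  rw [Bool.eq_iff_iff]
  simp only [Bool.and_eq_true, beq_iff_eq, pvOk_iff, key, PySem.Set.empty]
  simp
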